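-- pv_equiv track=rewrite | github.com/BTheDragonMaster/parasect | src/parasect/core/feature_extraction.py | get_reference_positions
-- ===== SOURCE A (Python) =====
-- from typing import Union, List
--
-- def get_reference_positions(positions: List[int], aligned_reference: str) -> List[int]:
--     """
--     Adjusts a list of positions to account for gaps in the reference sequence
--
--     Input:
--     positions: list of [int, ->], with integers representing positions of interest in
--         the reference sequence
--     aligned_reference: the (aligned) reference sequence
--
--     Output:
--     pos_list: list of [int, ->], a new list of positions, each >= the original position
--     """
--     pos_list = []
--     position = 0
--     for i, aa in enumerate(aligned_reference):
--         if aa != "-":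
--             if position in positions:
--                 pos_list.append(i)
--             position += 1
--     return pos_list
-- ===== SOURCE B (Python) =====
-- def get_reference_positions(positions, aligned_reference):
--     # Build the ungapped->gapped index table once, then look up only the
--     # requested positions (sorted, deduplicated, out-of-range dropped).
--     mapping = [i for i, aa in enumerate(aligned_reference) if aa != "-"]
--     return [mapping[p] for p in sorted(set(positions)) if 0 <= p < len(mapping)]
-- ===== Notes on version B (the rewrite author's own statement) =====
-- stated objective: faster
-- what changed: Replaces the per-character 'position in positions' membership scan with a one-pass ungapped-to-gapped index table plus direct lookups of the sorted, deduplicated requested positions.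
import Mathlib
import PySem

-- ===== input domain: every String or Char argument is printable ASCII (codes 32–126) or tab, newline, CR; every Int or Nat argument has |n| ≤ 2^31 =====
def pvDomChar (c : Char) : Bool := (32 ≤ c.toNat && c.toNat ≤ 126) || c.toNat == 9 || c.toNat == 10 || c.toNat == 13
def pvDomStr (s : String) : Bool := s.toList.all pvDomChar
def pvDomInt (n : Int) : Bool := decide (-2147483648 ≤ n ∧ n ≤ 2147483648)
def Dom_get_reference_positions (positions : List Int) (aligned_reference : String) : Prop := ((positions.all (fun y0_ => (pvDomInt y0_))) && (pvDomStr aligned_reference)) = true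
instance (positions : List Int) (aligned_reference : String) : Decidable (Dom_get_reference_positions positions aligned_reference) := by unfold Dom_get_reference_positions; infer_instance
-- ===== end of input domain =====

-- B replaces A's per-character membership scan by a one-pass index table plus
-- sorted-deduplicated lookups (objective: faster).

-- ===== PORT A =====
def get_reference_positions (positions : List Int) (aligned_reference : String) : List Int :=
  ((PySem.List.enumerate aligned_reference.toList).foldl
    (fun (st : List Int × Int) (p : Int × Char) =>
      if p.2 ≠ '-' then
        ((if st.2 ∈ positions then st.1 ++ [p.1] else st.1), st.2 + 1)
      else st)
    ([], 0)).1

-- ===== PORT B =====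
def get_reference_positions_alt (positions : List Int) (aligned_reference : String) : List Int :=
  let mapping : List Int :=
    (PySem.List.enumerate aligned_reference.toList).filterMap
      (fun p => if p.2 ≠ '-' then some p.1 else none)
  (PySem.List.sorted (PySem.Set.ofList positions) (fun x => x) false).filterMap
    (fun p => if 0 ≤ p ∧ p < (mapping.length : Int) then PySem.List.pyGet? mapping p else none)

-- ===== PRECONDITION & SPEC =====
def Spec_get_reference_positions (positions : List Int) (aligned_reference : String) (out : List Int) : Prop := out = get_reference_positions_alt positions aligned_reference
instance (positions : List Int) (aligned_reference : String) (out : List Int) : Decidable (Spec_get_reference_positions positions aligned_reference out) := by unfold Spec_get_reference_positions; infer_instance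

-- ===== CLAIM (what is proved, stated in full; the proofs are below) =====
def Claim_equal_get_reference_positions : Prop := ∀ (positions : List Int) (aligned_reference : String), Dom_get_reference_positions positions aligned_reference → Spec_get_reference_positions positions aligned_reference (get_reference_positions positions aligned_reference)

-- ===== LEMMAS AND PROOFS =====

/-- `pick positions m pos` selects, in order, the entries `m[k]` with
`pos + k ∈ positions`: the common contract of both programs. -/
def pick (positions : List Int) : List Int → Int → List Int
  | [], _ => []
  | j :: rest, pos => (if pos ∈ positions then [j] else []) ++ pick positions rest (pos + 1)

lemma show_filterMap_cons (p : Int × Char) (rest : List (Int × Char)) (hp : ¬p.2 = '-') :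
    List.filterMap (fun p : Int × Char => if p.2 ≠ '-' then some p.1 else none) (p :: rest)
      = p.1 :: List.filterMap (fun p : Int × Char => if p.2 ≠ '-' then some p.1 else none) rest := by
  rw [List.filterMap_cons]
  simp [hp]

lemma foldA (positions : List Int) :
    ∀ (l : List (Int × Char)) (acc : List Int) (pos : Int),
      (l.foldl
        (fun (st : List Int × Int) (p : Int × Char) =>
          if p.2 ≠ '-' then
            ((if st.2 ∈ positions then st.1 ++ [p.1] else st.1), st.2 + 1)
          else st)
        (acc, pos)).1
      = acc ++ pick positions (l.filterMap (fun p => if p.2 ≠ '-' then some p.1 else none)) pos := by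
  intro l
  induction l with
  | nil => intro acc pos; simp [pick]
  | cons p rest ih =>
    intro acc pos
    simp only [List.foldl_cons]
    by_cases hp : p.2 = '-'
    · rw [if_neg (by simp [hp]), List.filterMap_cons_none (by simp [hp]), ih]
    · rw [if_pos (by simp [hp]), show_filterMap_cons p rest hp]
      by_cases hm : pos ∈ positions
      · rw [if_pos hm, ih]
        simp [pick, hm]
      · rw [if_neg hm, ih]
        simp [pick, hm]

lemma pyGet?_cons_of_pos (a : Int) (l : List Int) (k : Int) (hk : 1 ≤ k) :
    PySem.List.pyGet? (a :: l) k = PySem.List.pyGet? l (k - 1) := by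
  obtain ⟨n, rfl⟩ : ∃ n : Nat, k = ((n + 1 : Nat) : Int) := ⟨(k - 1).toNat, by omega⟩
  have h2 : ((n + 1 : Nat) : Int) - 1 = ((n : Nat) : Int) := by push_cast; ring
  rw [h2, PySem.List.pyGet?_natCast, PySem.List.pyGet?_natCast]
  simp

lemma pyGet?_zero (a : Int) (l : List Int) :
    PySem.List.pyGet? (a :: l) 0 = some a := by
  have : (0 : Int) = ((0 : Nat) : Int) := rfl
  rw [this, PySem.List.pyGet?_natCast]
  rfl

/-- Core lemma: `pick` equals lookup along any strictly increasing list `L`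
whose members are exactly the requested positions inside the window. -/
lemma pick_eq_map (positions : List Int) :
    ∀ (m : List Int) (pos : Int) (L : List Int),
      L.Pairwise (· < ·) →
      (∀ p, p ∈ L ↔ (pos ≤ p ∧ p < pos + (m.length : Int) ∧ p ∈ positions)) →
      pick positions m pos = L.map (fun p => (PySem.List.pyGet? m (p - pos)).getD 0) := by
  intro m
  induction m with
  | nil =>
    intro pos L _ hmem
    have : L = [] := by
      cases L with
      | nil => rfl
      | cons q t =>
        have h := (hmem q).1 (List.mem_cons_self)
        simp only [List.length_nil, Nat.cast_zero] at h
        omega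
    simp [this, pick]
  | cons j rest ih =>
    intro pos L hs hmem
    by_cases hm : pos ∈ positions
    · have hposL : pos ∈ L := (hmem pos).2 ⟨le_refl _, by simp only [List.length_cons]; push_cast; omega, hm⟩
      cases L with
      | nil => simp at hposL
      | cons q L' =>
        have hq : q = pos := by
          rcases List.mem_cons.1 hposL with h | h
          · omega
          · have hlt := (List.pairwise_cons.1 hs).1 pos h
            have hge : pos ≤ q := ((hmem q).1 List.mem_cons_self).1
            omega
        subst hq
        have hs' := (List.pairwise_cons.1 hs).2
        have hgt : ∀ p ∈ L', q < p := (List.pairwise_cons.1 hs).1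
        have hmem' : ∀ p, p ∈ L' ↔ (q + 1 ≤ p ∧ p < q + 1 + (rest.length : Int) ∧ p ∈ positions) := by
          intro p
          constructor
          · intro hpL'
            have h1 := (hmem p).1 (List.mem_cons_of_mem _ hpL')
            have h2 := hgt p hpL'
            simp only [List.length_cons] at h1
            push_cast at h1
            exact ⟨by omega, by omega, h1.2.2⟩
          · intro ⟨h1, h2, h3⟩
            have : p ∈ q :: L' := (hmem p).2 ⟨by omega, by
              simp only [List.length_cons]; push_cast; omega, h3⟩
            rcases List.mem_cons.1 this with h | h
            · omega
            · exact h
        have hrec := ih (q + 1) L' hs' hmem'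
        simp only [pick, if_pos hm, List.map_cons]
        have h0 : (PySem.List.pyGet? (j :: rest) (q - q)).getD 0 = j := by
          rw [show q - q = (0 : Int) from by ring, pyGet?_zero]
          rfl
        rw [h0, hrec, List.singleton_append, List.cons.injEq]
        refine ⟨rfl, ?_⟩
        apply List.map_congr_left
        intro p hpL'
        have h1 : q + 1 ≤ p := ((hmem' p).1 hpL').1
        rw [pyGet?_cons_of_pos j rest (p - q) (by omega),
          show p - q - 1 = p - (q + 1) from by ring]
    · have hposL : pos ∉ L := fun h => hm ((hmem pos).1 h).2.2
      have hmem' : ∀ p, p ∈ L ↔ (pos + 1 ≤ p ∧ p < pos + 1 + (rest.length : Int) ∧ p ∈ positions) := by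
        intro p
        constructor
        · intro hpL
          have h1 := (hmem p).1 hpL
          have hne : p ≠ pos := fun h => hposL (h ▸ hpL)
          simp only [List.length_cons] at h1
          push_cast at h1
          refine ⟨?_, by omega, h1.2.2⟩
          rcases eq_or_lt_of_le h1.1 with h | h
          · exact absurd h.symm hne
          · omega
        · intro ⟨h1, h2, h3⟩
          exact (hmem p).2 ⟨by omega, by
            simp only [List.length_cons]; push_cast; omega, h3⟩
      have hrec := ih (pos + 1) L hs hmem'
      simp only [pick, if_neg hm, List.nil_append]
      rw [hrec]
      apply List.map_congr_left
      intro p hpL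
      have h1 : pos + 1 ≤ p := ((hmem' p).1 hpL).1
      rw [pyGet?_cons_of_pos j rest (p - pos) (by omega),
        show p - pos - 1 = p - (pos + 1) from by ring]

/-- A guarded `filterMap` whose body is `some` under the guard is a
`filter` followed by a `map`. -/
lemma filterMap_guard_eq_map (L : List Int) (c : Int → Prop) [DecidablePred c]
    (g : Int → Option Int) (h : ∀ p, c p → (g p).isSome) :
    L.filterMap (fun p => if c p then g p else none)
      = (L.filter (fun p => decide (c p))).map (fun p => (g p).getD 0) := by
  induction L with
  | nil => rfl
  | cons q L' ih =>
    by_cases hq : c q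
    · rcases Option.isSome_iff_exists.1 (h q hq) with ⟨v, hv⟩
      simp [hq, hv, ih]
    · simp [hq, ih]

lemma pyGet?_isSome (m : List Int) (p : Int) (h : 0 ≤ p ∧ p < (m.length : Int)) :
    (PySem.List.pyGet? m p).isSome := by
  have h1 : p = ((p.toNat : Int)) := by omega
  rw [h1, PySem.List.pyGet?_natCast]
  have hlt : p.toNat < m.length := by omega
  simp [List.getElem?_eq_getElem hlt]

-- ===== VERDICT (by name: the statement is the Claim_ definition above) =====
theorem get_reference_positions_spec : Claim_equal_get_reference_positions := by
  intro positions aligned_reference _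
  unfold Spec_get_reference_positions get_reference_positions get_reference_positions_alt
  set l := PySem.List.enumerate aligned_reference.toList with hl
  set m : List Int := l.filterMap (fun p => if p.2 ≠ '-' then some p.1 else none) with hmdef
  rw [foldA positions l [] 0]
  simp only [List.nil_append]
  rw [filterMap_guard_eq_map _ _ _ (fun p hp => pyGet?_isSome m p hp)]
  set L := (PySem.List.sorted (PySem.Set.ofList positions) (fun x => x) false).filter
      (fun p => decide (0 ≤ p ∧ p < (m.length : Int))) with hL
  have hs : L.Pairwise (· < ·) :=
    (PySem.List.sorted_ofList_pairwise_lt positions).filter _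
  have hmem : ∀ p, p ∈ L ↔ (0 ≤ p ∧ p < 0 + (m.length : Int) ∧ p ∈ positions) := by
    intro p
    rw [hL, List.mem_filter]
    simp [PySem.List.mem_sorted, PySem.Set.mem_ofList]
    tauto
  rw [pick_eq_map positions m 0 L hs hmem]
  apply List.map_congr_left
  intro p _
  simp
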